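-- pv_equiv track=rewrite | github.com/Faksxs/Tomehubnew | apps/backend/services/ai_service.py | sanitize_generated_tags
-- ===== SOURCE A (Python) =====
-- from typing import List, Optional, Dict, Any
--
-- def sanitize_generated_tags(raw_tags: Any) -> List[str]:
--     """
--     Enforce tag quality:
--     - String tags only
--     - 1..4 words per tag
--     - Deduplicated (case-insensitive)
--     - Max 5 tags
--     """
--     if not isinstance(raw_tags, list):
--         return []
--
--     clean_tags: List[str] = []
--     seen = set()
--     for tag in raw_tags:
--         if not isinstance(tag, str):
--             continue
--         normalized = " ".join(tag.strip().split())
--         if not normalized: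
--             continue
--         word_count = len(normalized.split(" "))
--         if word_count < 1 or word_count > 4:
--             continue
--         key = normalized.lower()
--         if key in seen:
--             continue
--         seen.add(key)
--         clean_tags.append(normalized)
--         if len(clean_tags) >= 5:
--             break
--     return clean_tags
-- ===== SOURCE B (Python) =====
-- def sanitize_generated_tags(raw_tags):
--     if not isinstance(raw_tags, list):
--         return []
--     normalized = [" ".join(t.strip().split()) for t in raw_tags if isinstance(t, str)]
--     valid = [t for t in normalized if t and len(t.split(" ")) <= 4]
--     by_key = {}
--     for t in valid:
--         by_key.setdefault(t.lower(), t)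
--     return list(by_key.values())[:5]
-- ===== Notes on version B (the rewrite author's own statement) =====
-- stated objective: simpler
-- what changed: Replaced A's single stateful loop with early break and a manual seen-set by three sequential passes (normalize via map, filter validity, dedupe via dict.setdefault) followed by a [:5] slice.
import Mathlib
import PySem

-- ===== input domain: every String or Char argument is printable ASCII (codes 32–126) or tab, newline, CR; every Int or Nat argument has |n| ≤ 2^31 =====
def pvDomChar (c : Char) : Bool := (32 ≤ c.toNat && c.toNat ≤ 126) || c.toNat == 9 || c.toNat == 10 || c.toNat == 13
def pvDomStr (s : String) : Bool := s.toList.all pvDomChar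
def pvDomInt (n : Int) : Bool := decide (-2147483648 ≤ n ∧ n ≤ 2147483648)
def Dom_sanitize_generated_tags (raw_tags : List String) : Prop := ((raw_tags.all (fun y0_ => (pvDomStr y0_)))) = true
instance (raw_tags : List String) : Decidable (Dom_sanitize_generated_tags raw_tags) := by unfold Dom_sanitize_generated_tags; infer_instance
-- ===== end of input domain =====

-- B replaces A's single early-breaking loop by three sequential passes (normalize, filter, dedupe via dict.setdefault) and a final take-5 slice; objective: simpler.

-- ===== PORT A =====
-- A's loop: accumulate clean tags and a seen-set, break at 5.
def sanA (l : List String) (clean : List String) (seen : PySem.Set String) : List String :=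
  match l with
  | [] => clean
  | tag :: rest =>
    let normalized := PySem.Str.join " " (PySem.Str.split₀ (PySem.Str.strip tag))
    if normalized = "" then sanA rest clean seen
    else
      let word_count := (PySem.Chars.splitOn normalized.toList (" ".toList)).length
      if word_count < 1 ∨ word_count > 4 then sanA rest clean seen
      else
        let key := PySem.Str.lower normalized
        if PySem.Set.contains seen key then sanA rest clean seen
        else
          let seen' := PySem.Set.add seen key
          let clean' := clean ++ [normalized]
          if 5 ≤ clean'.length then clean' else sanA rest clean' seen'

def sanitize_generated_tags (raw_tags : List String) : List String :=
  sanA raw_tags [] PySem.Set.empty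

-- ===== PORT B =====
def sanitize_generated_tags_alt (raw_tags : List String) : List String :=
  let normalized := raw_tags.map (fun t => PySem.Str.join " " (PySem.Str.split₀ (PySem.Str.strip t)))
  let valid := normalized.filter (fun t => !(t == "") && decide ((PySem.Chars.splitOn t.toList (" ".toList)).length ≤ 4))
  let by_key := valid.foldl (fun d t => PySem.Dict.setdefault d (PySem.Str.lower t) t) PySem.Dict.empty
  (PySem.Dict.values by_key).take 5

-- ===== PRECONDITION & SPEC =====
def Spec_sanitize_generated_tags (raw_tags : List String) (out : List String) : Prop := out = sanitize_generated_tags_alt raw_tags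
instance (raw_tags : List String) (out : List String) : Decidable (Spec_sanitize_generated_tags raw_tags out) := by unfold Spec_sanitize_generated_tags; infer_instance

-- ===== CLAIM (what is proved, stated in full; the proofs are below) =====
def Claim_equal_sanitize_generated_tags : Prop := ∀ (raw_tags : List String), Dom_sanitize_generated_tags raw_tags → Spec_sanitize_generated_tags raw_tags (sanitize_generated_tags raw_tags)

-- ===== LEMMAS AND PROOFS =====

-- B's normalization / validity / dict-building steps, named for the proofs (definitionally those of the port).
def normB (t : String) : String := PySem.Str.join " " (PySem.Str.split₀ (PySem.Str.strip t))
def validB (t : String) : Bool := !(t == "") && decide ((PySem.Chars.splitOn t.toList (" ".toList)).length ≤ 4)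
def bfold (l : List String) (d : PySem.Dict String String) : PySem.Dict String String :=
  l.foldl (fun d t => PySem.Dict.setdefault d (PySem.Str.lower t) t) d

-- splitting on a nonempty separator never yields the empty list (so A's `word_count < 1` branch never fires)
theorem splitOn_go_len (sep : List Char) (fuel : Nat) (l cur : List Char) (acc : List (List Char)) :
    acc.length + 1 ≤ (PySem.Chars.splitOn.go sep fuel l cur acc).length := by
  induction fuel generalizing l cur acc with
  | zero => simp [PySem.Chars.splitOn.go]
  | succ n ih =>
    cases l with
    | nil => simp [PySem.Chars.splitOn.go]
    | cons c rest =>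
      rw [PySem.Chars.splitOn.go]
      split
      · exact le_trans (by simp) (ih _ _ _)
      · exact ih _ _ _

theorem splitOn_len_ge_one (s : List Char) : 1 ≤ (PySem.Chars.splitOn s [' ']).length :=
  le_trans (by simp) (splitOn_go_len _ _ _ _ [])

-- values of an insert at a fresh key append
theorem values_insert_fresh (d : PySem.Dict String String) {k : String} (v : String)
    (h : d.contains k = false) :
    PySem.Dict.values (d.insert k v) = PySem.Dict.values d ++ [v] := by
  simp [PySem.Dict.values, PySem.Dict.items_insert_of_not_contains d v h]

-- A's seen-set test on d.keys agrees with the dict's contains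
theorem set_contains_keys (d : PySem.Dict String String) (k : String) :
    PySem.Set.contains (PySem.Dict.keys d) k = PySem.Dict.contains d k := by
  rw [PySem.Dict.contains_eq_decide_mem_keys]
  unfold PySem.Set.contains
  simp

-- the dict fold only appends values
theorem bfold_values_prefix (l : List String) (d : PySem.Dict String String) :
    ∃ s, PySem.Dict.values (bfold l d) = PySem.Dict.values d ++ s := by
  induction l generalizing d with
  | nil => exact ⟨[], by simp [bfold]⟩
  | cons t rest ih =>
    have hstep : bfold (t :: rest) d = bfold rest (PySem.Dict.setdefault d (PySem.Str.lower t) t) := rfl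
    rw [hstep]
    rcases hc : PySem.Dict.contains d (PySem.Str.lower t) with _ | _
    · rw [PySem.Dict.setdefault_of_not_contains d t hc]
      obtain ⟨s, hs⟩ := ih (d.insert (PySem.Str.lower t) t)
      exact ⟨t :: s, by rw [hs, values_insert_fresh d t hc]; simp⟩
    · rw [PySem.Dict.setdefault_of_contains d t hc]
      exact ih d

-- main invariant: A's loop over l, started from the values/keys of dict d (fewer than 5 entries),
-- equals take 5 of B's fold over the normalized-and-filtered remainder of l
theorem san_eq (l : List String) (d : PySem.Dict String String)
    (h : (PySem.Dict.values d).length < 5) :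
    sanA l (PySem.Dict.values d) (PySem.Dict.keys d) =
      (PySem.Dict.values (bfold ((l.map normB).filter validB) d)).take 5 := by
  induction l generalizing d with
  | nil =>
    simp [sanA, bfold, List.take_of_length_le (le_of_lt h)]
  | cons tag rest ih =>
    rw [sanA]
    by_cases hn : normB tag = ""
    · simp only [List.map_cons, List.filter_cons]
      have : validB (normB tag) = false := by simp [validB, hn]
      rw [this]
      simp only [normB] at hn
      rw [if_pos hn]
      exact ih d h
    · have hwcge : 1 ≤ (PySem.Chars.splitOn (normB tag).toList (" ".toList)).length := by
        have := splitOn_len_ge_one (normB tag).toList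
        simpa using this
      by_cases hw : (PySem.Chars.splitOn (normB tag).toList (" ".toList)).length ≤ 4
      · -- valid tag: kept by the filter
        have hv : validB (normB tag) = true := by
          simp only [validB, Bool.and_eq_true, Bool.not_eq_true', beq_eq_false_iff_ne,
            decide_eq_true_eq]
          exact ⟨hn, hw⟩
        simp only [List.map_cons, List.filter_cons, hv, if_pos]
        set normalized := PySem.Str.join " " (PySem.Str.split₀ (PySem.Str.strip tag)) with hnorm
        have hnb : normB tag = normalized := rfl
        rw [hnb] at hn hw hwcge ⊢
        rw [if_neg hn, if_neg (by omega :
          ¬ ((PySem.Chars.splitOn normalized.toList (" ".toList)).length < 1 ∨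
             (PySem.Chars.splitOn normalized.toList (" ".toList)).length > 4))]
        have hstep : bfold (normalized :: (rest.map normB).filter validB) d
            = bfold ((rest.map normB).filter validB)
                (PySem.Dict.setdefault d (PySem.Str.lower normalized) normalized) := rfl
        rw [hstep]
        set key := PySem.Str.lower normalized with hkey
        rw [set_contains_keys]
        rcases hc : PySem.Dict.contains d key with _ | _
        · -- fresh key: A appends; B inserts
          rw [PySem.Dict.setdefault_of_not_contains d normalized hc]
          simp only [Bool.false_eq_true, if_false]
          have hvals : PySem.Dict.values (d.insert key normalized) = PySem.Dict.values d ++ [normalized] :=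
            values_insert_fresh d normalized hc
          have hkeys : PySem.Dict.keys (d.insert key normalized) = PySem.Dict.keys d ++ [key] :=
            PySem.Dict.keys_insert_of_not_contains d normalized hc
          have hmem : key ∉ PySem.Dict.keys d := by
            rw [PySem.Dict.contains_eq_decide_mem_keys] at hc
            simpa using hc
          have haddkeys : PySem.Set.add (PySem.Dict.keys d) key = PySem.Dict.keys (d.insert key normalized) := by
            rw [hkeys]
            simp [PySem.Set.add, PySem.Set.contains, hmem]
          by_cases h5 : 5 ≤ (PySem.Dict.values d ++ [normalized]).length
          · -- break: clean is full
            rw [if_pos h5]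
            have hlen : (PySem.Dict.values (d.insert key normalized)).length = 5 := by
              rw [hvals]; simp at h5 ⊢; omega
            obtain ⟨s, hs⟩ := bfold_values_prefix ((rest.map normB).filter validB) (d.insert key normalized)
            rw [hs, ← hvals, ← hlen, List.take_left]
          · rw [if_neg h5]
            rw [haddkeys, ← hvals]
            exact ih (d.insert key normalized) (by rw [hvals]; simp at h5 ⊢; omega)
        · -- duplicate key: both skip
          rw [PySem.Dict.setdefault_of_contains d normalized hc]
          simp only [if_true]
          exact ih d h
      · -- word count > 4: both skip
        have hv : validB (normB tag) = false := by
          simp only [validB, Bool.and_eq_false_iff, decide_eq_false_iff_not]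
          exact Or.inr hw
        simp only [List.map_cons, List.filter_cons, hv]
        simp only [Bool.false_eq_true, if_false]
        simp only [normB] at hn hw hwcge
        rw [if_neg hn, if_pos (by omega :
          ((PySem.Chars.splitOn (PySem.Str.join " " (PySem.Str.split₀ (PySem.Str.strip tag))).toList (" ".toList)).length < 1 ∨
           (PySem.Chars.splitOn (PySem.Str.join " " (PySem.Str.split₀ (PySem.Str.strip tag))).toList (" ".toList)).length > 4))]
        exact ih d h

-- ===== VERDICT (by name: the statement is the Claim_ definition above) =====
theorem sanitize_generated_tags_spec : Claim_equal_sanitize_generated_tags := by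
  intro raw_tags _
  unfold Spec_sanitize_generated_tags sanitize_generated_tags sanitize_generated_tags_alt
  have h := san_eq raw_tags PySem.Dict.empty (by simp [PySem.Dict.values, PySem.Dict.empty])
  simpa [normB, validB, bfold, PySem.Dict.keys, PySem.Dict.values, PySem.Set.empty] using h
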